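-- pv_equiv track=rewrite | github.com/kohr2/code-grapher | core/services/simple_ai_service.py | _create_line_ranges
-- ===== SOURCE A (Python) =====
-- from typing import Dict, Any, List, Optional
--
-- def _create_line_ranges(line_numbers: List[int]) -> List[str]:
--     """Create line ranges from a list of line numbers"""
--     if not line_numbers:
--         return []
--
--     line_numbers = sorted(set(line_numbers))
--     ranges = []
--     start = line_numbers[0]
--     end = line_numbers[0]
--
--     for i in range(1, len(line_numbers)):
--         if line_numbers[i] == end + 1:
--             end = line_numbers[i]
--         else:
--             if start == end:
--                 ranges.append(str(start))
--             else:
--                 ranges.append(f"{start}-{end}")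
--             start = line_numbers[i]
--             end = line_numbers[i]
--
--     # Add the last range
--     if start == end:
--         ranges.append(str(start))
--     else:
--         ranges.append(f"{start}-{end}")
--
--     return ranges
-- ===== SOURCE B (Python) =====
-- def _create_line_ranges(line_numbers):
--     """Create line ranges from a list of line numbers"""
--     s = set(line_numbers)
--     nums = sorted(s)
--     starts = [n for n in nums if n - 1 not in s]
--     ends = [n for n in nums if n + 1 not in s]
--     return [str(a) if a == b else f"{a}-{b}" for a, b in zip(starts, ends)]
-- ===== Notes on version B (the rewrite author's own statement) =====
-- stated objective: alternative
-- what changed: B detects range boundaries by set membership (n is a run start iff n-1 is not in the set, a run end iff n+1 is not) and zips the two boundary lists, instead of A's sequential scan maintaining running start/end state with a final flush.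
import Mathlib
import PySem

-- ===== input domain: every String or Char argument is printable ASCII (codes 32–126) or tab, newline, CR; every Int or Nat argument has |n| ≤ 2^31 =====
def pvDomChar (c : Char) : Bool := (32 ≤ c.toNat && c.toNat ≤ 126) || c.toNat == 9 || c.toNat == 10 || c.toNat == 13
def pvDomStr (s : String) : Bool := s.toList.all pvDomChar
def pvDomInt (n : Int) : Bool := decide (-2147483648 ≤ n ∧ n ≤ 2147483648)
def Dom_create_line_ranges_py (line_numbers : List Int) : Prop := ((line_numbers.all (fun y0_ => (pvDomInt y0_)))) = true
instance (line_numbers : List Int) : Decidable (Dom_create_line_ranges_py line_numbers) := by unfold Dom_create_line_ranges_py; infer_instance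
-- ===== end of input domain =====

-- B finds range boundaries by set membership (start iff n-1 absent, end iff n+1 absent) and zips them; objective: alternative.

-- ===== PORT A =====
def create_line_ranges_py (line_numbers : List Int) : List String :=
  if line_numbers = [] then []
  else
    let nums := PySem.List.sorted (PySem.Set.ofList line_numbers) (fun x => x) false
    let start := PySem.List.pyGetD nums 0 0
    let st := (PySem.List.pyRange 1 (nums.length : Int) 1).foldl
      (fun (acc : List String × Int × Int) i =>
        let v := PySem.List.pyGetD nums i 0
        if v = acc.2.2 + 1 then (acc.1, acc.2.1, v)
        else (acc.1 ++ [if acc.2.1 = acc.2.2 then PySem.Int.toStr acc.2.1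
                        else PySem.Int.toStr acc.2.1 ++ "-" ++ PySem.Int.toStr acc.2.2], v, v))
      ([], start, start)
    st.1 ++ [if st.2.1 = st.2.2 then PySem.Int.toStr st.2.1
             else PySem.Int.toStr st.2.1 ++ "-" ++ PySem.Int.toStr st.2.2]

-- ===== PORT B =====
def create_line_ranges_py_alt (line_numbers : List Int) : List String :=
  let s := PySem.Set.ofList line_numbers
  let nums := PySem.List.sorted s (fun x => x) false
  let starts := nums.filter (fun n => !(PySem.Set.contains s (n - 1)))
  let ends := nums.filter (fun n => !(PySem.Set.contains s (n + 1)))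
  (starts.zip ends).map (fun ab =>
    if ab.1 = ab.2 then PySem.Int.toStr ab.1
    else PySem.Int.toStr ab.1 ++ "-" ++ PySem.Int.toStr ab.2)

-- ===== PRECONDITION & SPEC =====
def Spec_create_line_ranges_py (line_numbers : List Int) (out : List String) : Prop := out = create_line_ranges_py_alt line_numbers
instance (line_numbers : List Int) (out : List String) : Decidable (Spec_create_line_ranges_py line_numbers out) := by unfold Spec_create_line_ranges_py; infer_instance

-- ===== CLAIM (what is proved, stated in full; the proofs are below) =====
def Claim_equal_create_line_ranges_py : Prop := ∀ (line_numbers : List Int), Dom_create_line_ranges_py line_numbers → Spec_create_line_ranges_py line_numbers (create_line_ranges_py line_numbers)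

-- ===== LEMMAS AND PROOFS =====

-- format one run (proof-side abbreviation for the formatting conditional both programs use)
def pvFmt (a b : Int) : String :=
  if a = b then PySem.Int.toStr a else PySem.Int.toStr a ++ "-" ++ PySem.Int.toStr b

-- A's loop body, named for the proof (identical to the inline lambda in A's port)
def pvAStep (acc : List String × Int × Int) (v : Int) : List String × Int × Int :=
  if v = acc.2.2 + 1 then (acc.1, acc.2.1, v)
  else (acc.1 ++ [pvFmt acc.2.1 acc.2.2], v, v)

-- proof-side view of a maximal consecutive run: advance end through consecutive elements
def pvRun : Int → List Int → Int × List Int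
  | e, [] => (e, [])
  | e, v :: t => if v = e + 1 then pvRun v t else (e, v :: t)

theorem pvRun_len (e : Int) (t : List Int) : (pvRun e t).2.length ≤ t.length := by
  induction t generalizing e with
  | nil => simp [pvRun]
  | cons v t ih =>
    simp only [pvRun]
    split
    · exact le_trans (ih _) (Nat.le_succ _)
    · simp

-- proof-side view of the whole output: emit one run, continue on the remainder
def pvEmit : List Int → List String
  | [] => []
  | s :: t => pvFmt s (pvRun s t).1 :: pvEmit (pvRun s t).2
termination_by l => l.length
decreasing_by exact Nat.lt_succ_of_le (pvRun_len s t)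

-- A's fold-and-flush over t equals emitting the current run then recursing
theorem pvLoop_eq (t : List Int) : ∀ (s e : Int) (rs : List String),
    (t.foldl pvAStep (rs, s, e)).1 ++ [pvFmt (t.foldl pvAStep (rs, s, e)).2.1 (t.foldl pvAStep (rs, s, e)).2.2]
      = rs ++ pvFmt s (pvRun e t).1 :: pvEmit (pvRun e t).2 := by
  induction t with
  | nil => intro s e rs; simp [pvRun, pvEmit]
  | cons v t ih =>
    intro s e rs
    by_cases h : v = e + 1
    · simp only [List.foldl_cons, pvAStep, pvRun, if_pos h]
      exact ih s v rs
    · simp only [List.foldl_cons, pvAStep, pvRun, if_neg h]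
      rw [ih v v (rs ++ [pvFmt s e])]
      rw [pvEmit, List.append_assoc]
      rfl

-- A computes pvEmit of the sorted deduplicated input
theorem pvA_eq_emit (xs : List Int) :
    create_line_ranges_py xs = pvEmit (PySem.List.sorted (PySem.Set.ofList xs) (fun x => x) false) := by
  unfold create_line_ranges_py
  by_cases h : xs = []
  · subst h
    rw [if_pos rfl, show PySem.List.sorted (PySem.Set.ofList ([] : List Int)) (fun x => x) false = [] from rfl, pvEmit]
  · simp only [if_neg h]
    have hne : PySem.List.sorted (PySem.Set.ofList xs) (fun x => x) false ≠ [] := by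
      intro hnil
      rw [PySem.List.sorted_eq_nil_iff] at hnil
      cases xs with
      | nil => exact h rfl
      | cons a l =>
        have ha : a ∈ PySem.Set.ofList (a :: l) := by
          rw [PySem.Set.mem_ofList]; exact List.mem_cons_self
        rw [hnil] at ha
        exact absurd ha List.not_mem_nil
    obtain ⟨m, t, hmt⟩ := List.exists_cons_of_ne_nil hne
    rw [hmt]
    have hfold := PySem.List.foldl_pyRange_pyGetD' (xs := m :: t) (d := 0) (f := pvAStep)
      (init := (([] : List String), PySem.List.pyGetD (m :: t) 0 0, PySem.List.pyGetD (m :: t) 0 0))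
      (a := 1) (by norm_num)
    simp only [show ((1 : Int).toNat) = 1 from rfl, List.drop_one, List.tail_cons] at hfold
    have hget0 : PySem.List.pyGetD (m :: t) (0 : Int) 0 = m := by
      simp [PySem.List.pyGetD, PySem.List.pyGet?, PySem.List.pyIdx?]
    rw [show (fun (acc : List String × Int × Int) i =>
        let v := PySem.List.pyGetD (m :: t) i 0
        if v = acc.2.2 + 1 then (acc.1, acc.2.1, v)
        else (acc.1 ++ [if acc.2.1 = acc.2.2 then PySem.Int.toStr acc.2.1
                        else PySem.Int.toStr acc.2.1 ++ "-" ++ PySem.Int.toStr acc.2.2], v, v))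
      = (fun (acc : List String × Int × Int) j => pvAStep acc (PySem.List.pyGetD (m :: t) j 0)) from by
        funext acc j; simp [pvAStep, pvFmt]]
    rw [hget0] at hfold
    rw [hget0, hfold]
    have hl := pvLoop_eq t m m []
    simp only [List.nil_append, pvFmt] at hl
    rw [hl]
    conv_rhs => rw [pvEmit]
    simp [pvFmt]

-- structural facts about one maximal run on a strictly increasing tail
theorem pvRun_facts (t : List Int) : ∀ (e : Int), t.Pairwise (· < ·) → (∀ x ∈ t, e < x) →
    e ≤ (pvRun e t).1 ∧
    (∀ x ∈ (pvRun e t).2, (pvRun e t).1 + 1 < x) ∧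
    (pvRun e t).2.Pairwise (· < ·) ∧
    (∃ r, t = r ++ (pvRun e t).2 ∧ ∀ n ∈ r, e < n ∧ n ≤ (pvRun e t).1) ∧
    (∀ m : Int, e < m → m ≤ (pvRun e t).1 → m ∈ t) := by
  induction t with
  | nil =>
    intro e _ _
    refine ⟨le_refl _, by simp [pvRun], by simp [pvRun], ⟨[], by simp [pvRun]⟩, ?_⟩
    intro m h1 h2; simp [pvRun] at h2; omega
  | cons v t ih =>
    intro e hs hgt
    have hv : e < v := hgt v List.mem_cons_self
    have hst := (List.pairwise_cons.mp hs).2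
    have hvt : ∀ x ∈ t, v < x := (List.pairwise_cons.mp hs).1
    by_cases h : v = e + 1
    · simp only [pvRun, if_pos h]
      obtain ⟨ha, hb, hc, ⟨r, hr, hrb⟩, he⟩ := ih v hst hvt
      refine ⟨by omega, hb, hc, ⟨v :: r, by rw [List.cons_append, ← hr], ?_⟩, ?_⟩
      · intro n hn
        rcases List.mem_cons.mp hn with h1 | h1
        · subst h1; exact ⟨hv, by omega⟩
        · have := hrb n h1; omega
      · intro m h1 h2
        by_cases hm : m = v
        · subst hm; exact List.mem_cons_self
        · exact List.mem_cons_of_mem _ (he m (by omega) h2)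
    · simp only [pvRun, if_neg h]
      refine ⟨le_refl _, ?_, hs, ⟨[], by simp⟩, ?_⟩
      · intro x hx
        rcases List.mem_cons.mp hx with h1 | h1
        · omega
        · have := hvt x h1; omega
      · intro m h1 h2; omega

-- filter (· == a) of a Nodup list containing a is [a]
theorem pvFilter_beq {u : List Int} {a : Int} (hu : u.Nodup) (ha : a ∈ u) :
    u.filter (fun n => n == a) = [a] := by
  induction u with
  | nil => exact absurd ha List.not_mem_nil
  | cons b u ih =>
    by_cases hba : b = a
    · subst hba
      have hnil : u.filter (fun n => n == b) = [] := by
        apply List.filter_eq_nil_iff.mpr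
        intro x hx hbeq
        exact (List.nodup_cons.mp hu).1 (beq_iff_eq.mp hbeq ▸ hx)
      rw [List.filter_cons, if_pos (by simp), hnil]
    · have hmem : a ∈ u := by
        rcases List.mem_cons.mp ha with h1 | h1
        · exact absurd h1.symm hba
        · exact h1
      rw [List.filter_cons, if_neg (by simp [hba])]
      exact ih (List.nodup_cons.mp hu).2 hmem

-- the core correspondence: on a strictly increasing list, run-emission equals
-- zipping the boundary filters (n starts a run iff n-1 absent, ends one iff n+1 absent)
theorem pvEmit_eq_zip : ∀ (N : Nat) (l : List Int), l.length ≤ N → l.Pairwise (· < ·) →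
    pvEmit l = ((l.filter (fun n => !(l.contains (n - 1)))).zip
                (l.filter (fun n => !(l.contains (n + 1))))).map (fun ab => pvFmt ab.1 ab.2) := by
  intro N
  induction N with
  | zero =>
    intro l hlen _
    have : l = [] := List.eq_nil_of_length_eq_zero (Nat.le_zero.mp hlen)
    subst this; simp [pvEmit]
  | succ N ihN =>
    intro l hlen hs
    cases l with
    | nil => simp [pvEmit]
    | cons v t =>
      have hvt : ∀ x ∈ t, v < x := (List.pairwise_cons.mp hs).1
      have hst : t.Pairwise (· < ·) := (List.pairwise_cons.mp hs).2
      obtain ⟨ha, hb, hc, ⟨r, hr, hrb⟩, he⟩ := pvRun_facts t v hst hvt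
      set pr := pvRun v t with hpr
      set P := fun n : Int => !((v :: t).contains (n - 1)) with hP
      set Q := fun n : Int => !((v :: t).contains (n + 1)) with hQ
      have hhigh : ∀ y : Int, pr.1 < y → (y ∈ v :: t ↔ y ∈ pr.2) := by
        intro y hy
        constructor
        · intro hmem
          rcases List.mem_cons.mp hmem with h1 | h1
          · omega
          · rw [hr] at h1
            rcases List.mem_append.mp h1 with h2 | h2
            · have := hrb y h2; omega
            · exact h2
        · intro hmem
          exact List.mem_cons_of_mem _ (by rw [hr]; exact List.mem_append_right _ hmem)
      -- the start filter
      have hfP : (v :: t).filter P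
          = v :: pr.2.filter (fun n => !(pr.2.contains (n - 1))) := by
        have hhead : P v = true := by
          rw [hP, Bool.not_eq_eq_eq_not, Bool.not_true, Bool.eq_false_iff]
          intro hcon
          rcases List.mem_cons.mp (List.contains_iff_mem.mp hcon) with h1 | h1
          · omega
          · have := hvt _ h1; omega
        have hrnil : r.filter P = [] := by
          apply List.filter_eq_nil_iff.mpr
          intro n hn hp
          have hbd := hrb n hn
          have hmem : (n - 1) ∈ v :: t := by
            by_cases h1 : n - 1 = v
            · rw [h1]; exact List.mem_cons_self
            · exact List.mem_cons_of_mem _ (he (n - 1) (by omega) (by omega))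
          rw [hP, Bool.not_eq_eq_eq_not, Bool.not_true, Bool.eq_false_iff] at hp
          exact hp (List.contains_iff_mem.mpr hmem)
        have hcongr : pr.2.filter P
            = pr.2.filter (fun n => !(pr.2.contains (n - 1))) := by
          apply List.filter_congr
          intro x hx
          have hx1 : pr.1 < x - 1 := by have := hb x hx; omega
          have hiff := hhigh (x - 1) hx1
          rw [hP, Bool.eq_iff_iff]
          by_cases h1 : (x - 1) ∈ pr.2
          · simp [h1, hiff.mpr h1]
          · have h2 : (x - 1) ∉ v :: t := fun hh => h1 (hiff.mp hh)
            simp [h1, h2]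
        rw [List.filter_cons, hhead, if_pos rfl]
        congr 1
        conv_lhs => rw [hr]
        rw [List.filter_append, hrnil, hcongr, List.nil_append]
      -- the end filter
      have hfQ : (v :: t).filter Q
          = pr.1 :: pr.2.filter (fun n => !(pr.2.contains (n + 1))) := by
        have hpwvr : (v :: r).Pairwise (· < ·) := by
          have hall : ((v :: r) ++ pr.2).Pairwise (· < ·) := by
            rw [show (v :: r) ++ pr.2 = v :: (r ++ pr.2) from rfl, ← hr]; exact hs
          exact (List.pairwise_append.mp hall).1
        have hmemE : pr.1 ∈ v :: r := by
          by_cases h1 : v = pr.1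
          · rw [← h1]; exact List.mem_cons_self
          · have h2 : pr.1 ∈ t := he _ (by omega) le_rfl
            rw [hr] at h2
            rcases List.mem_append.mp h2 with h3 | h3
            · exact List.mem_cons_of_mem _ h3
            · have := hb _ h3; omega
        have hq_iff : ∀ n ∈ v :: r, Q n = (n == pr.1) := by
          intro n hn
          have hnle : v ≤ n ∧ n ≤ pr.1 := by
            rcases List.mem_cons.mp hn with h1 | h1
            · subst h1; exact ⟨le_rfl, ha⟩
            · have := hrb n h1; omega
          rw [hQ]
          by_cases h1 : n = pr.1
          · rw [h1]
            have hnotm : (pr.1 + 1) ∉ v :: t := by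
              intro hmem
              have h2 := (hhigh (pr.1 + 1) (by omega)).mp hmem
              have := hb _ h2; omega
            simp [hnotm]
          · have hmem : (n + 1) ∈ v :: t :=
              List.mem_cons_of_mem _ (he (n + 1) (by omega) (by omega))
            simp [hmem, h1]
        have hvr : (v :: r).filter Q = [pr.1] := by
          rw [List.filter_congr hq_iff]
          exact pvFilter_beq hpwvr.nodup hmemE
        have hcongr : pr.2.filter Q
            = pr.2.filter (fun n => !(pr.2.contains (n + 1))) := by
          apply List.filter_congr
          intro x hx
          have hx1 : pr.1 < x + 1 := by have := hb x hx; omega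
          have hiff := hhigh (x + 1) hx1
          rw [hQ, Bool.eq_iff_iff]
          by_cases h1 : (x + 1) ∈ pr.2
          · simp [h1, hiff.mpr h1]
          · have h2 : (x + 1) ∉ v :: t := fun hh => h1 (hiff.mp hh)
            simp [h1, h2]
        have hsplit : (v :: t).filter Q = (v :: r).filter Q ++ pr.2.filter Q := by
          conv_lhs => rw [show v :: t = (v :: r) ++ pr.2 from by rw [List.cons_append, ← hr]]
          rw [List.filter_append]
        rw [hsplit, hvr, hcongr, List.singleton_append]
      -- put it together
      rw [pvEmit, ← hpr, hfP, hfQ, List.zip_cons_cons, List.map_cons]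
      congr 1
      have hlen2 : pr.2.length ≤ N := by
        have h1 := pvRun_len v t
        rw [← hpr] at h1
        simp only [List.length_cons] at hlen
        omega
      exact ihN pr.2 hlen2 hc

-- ===== VERDICT (by name: the statement is the Claim_ definition above) =====
theorem create_line_ranges_py_spec : Claim_equal_create_line_ranges_py := by
  intro xs _
  unfold Spec_create_line_ranges_py create_line_ranges_py_alt
  rw [pvA_eq_emit]
  have hpw : (PySem.List.sorted (PySem.Set.ofList xs) (fun x => x) false).Pairwise (· < ·) :=
    PySem.List.sorted_ofList_pairwise_lt xs
  have hcont : ∀ m : Int, PySem.Set.contains (PySem.Set.ofList xs) m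
      = (PySem.List.sorted (PySem.Set.ofList xs) (fun x => x) false).contains m := by
    intro m
    rw [Bool.eq_iff_iff]
    simp [PySem.List.mem_sorted]
  simp only [hcont]
  rw [pvEmit_eq_zip (PySem.List.sorted (PySem.Set.ofList xs) (fun x => x) false).length _ le_rfl hpw]
  simp [pvFmt]
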